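-- pv_equiv track=rewrite | github.com/Varunkumar-44/Ayurveda | final.py | find_disease_and_remedy
-- ===== SOURCE A (Python) =====
-- def find_disease_and_remedy(user_symptoms, disease_mapping, remedies_mapping):
--     """
--     Find the disease based on user input symptoms and return disease name and remedies.
--     """
--     user_symptoms_set = set([symptom.lower() for symptom in user_symptoms if symptom.lower() != 'nil'])
--
--     best_match = None
--     best_match_score = 0
--     remedies = None  # Initialize remedies variable to avoid reference error
--
--     # Iterate through disease_mapping to check for matching symptoms
--     for disease, symptoms in disease_mapping.items():
--         # Count how many symptoms match
--         matched_symptoms = user_symptoms_set.intersection(set([symptom.lower() for symptom in symptoms]))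
--         match_score = len(matched_symptoms)
--
--         if match_score >= 3:  # At least 3 symptoms need to match
--             if match_score > best_match_score:
--                 best_match = disease
--                 best_match_score = match_score
--                 remedies = remedies_mapping[disease]
--
--     # If no match was found, return None for both disease and remedies
--     if best_match is None:
--         return None, None
--
--     return best_match, remedies
-- ===== SOURCE B (Python) =====
-- def find_disease_and_remedy(user_symptoms, disease_mapping, remedies_mapping):
--     """
--     Find the disease based on user input symptoms and return disease name and remedies.
--     Inverted-index version: index symptoms -> diseases, count matches per disease.
--     """
--     wanted = {s.lower() for s in user_symptoms} - {'nil'}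
--
--     # Inverted index: lowercased symptom -> diseases listing it (deduped per disease)
--     index = {}
--     for disease, symptoms in disease_mapping.items():
--         for s in {sym.lower() for sym in symptoms}:
--             index.setdefault(s, []).append(disease)
--
--     # Per-disease match counter, driven by the user's symptoms only
--     counts = {}
--     for s in wanted:
--         for disease in index.get(s, ()):
--             counts[disease] = counts.get(disease, 0) + 1
--
--     best, best_score = None, 0
--     for disease in disease_mapping:
--         score = counts.get(disease, 0)
--         if score >= 3 and score > best_score:
--             best, best_score = disease, score
--
--     if best is None:
--         return None, None
--     return best, remedies_mapping[best]
-- ===== Notes on version B (the rewrite author's own statement) =====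
-- stated objective: alternative
-- what changed: Replaces A's per-disease set-intersection scan by an inverted index from lowercased symptom to the diseases listing it, so matches are counted by looking up only the user's deduped symptoms; the winner is then picked in one pass over disease_mapping with the same >=3 threshold and strict-improvement tie-breaking, and remedies are looked up once at the end.
import Mathlib
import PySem

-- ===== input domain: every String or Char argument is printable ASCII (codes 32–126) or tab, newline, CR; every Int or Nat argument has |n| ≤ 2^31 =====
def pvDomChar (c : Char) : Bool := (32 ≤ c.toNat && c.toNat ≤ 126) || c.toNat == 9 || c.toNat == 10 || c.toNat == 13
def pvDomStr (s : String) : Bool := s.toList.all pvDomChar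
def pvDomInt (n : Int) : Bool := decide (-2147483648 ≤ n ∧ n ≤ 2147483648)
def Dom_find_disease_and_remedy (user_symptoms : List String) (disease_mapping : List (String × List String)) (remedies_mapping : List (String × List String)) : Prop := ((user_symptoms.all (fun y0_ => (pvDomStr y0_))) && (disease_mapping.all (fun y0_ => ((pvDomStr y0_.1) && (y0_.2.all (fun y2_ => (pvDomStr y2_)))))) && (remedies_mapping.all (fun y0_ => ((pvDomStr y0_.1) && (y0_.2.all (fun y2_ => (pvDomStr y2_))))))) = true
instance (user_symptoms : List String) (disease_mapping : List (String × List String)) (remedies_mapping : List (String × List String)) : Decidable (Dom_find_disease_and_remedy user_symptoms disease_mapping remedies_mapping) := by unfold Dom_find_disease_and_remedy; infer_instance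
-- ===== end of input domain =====

-- B replaces A's per-disease scan over the user set by an inverted index (symptom → diseases)
-- driven only by the user's symptoms; equal return values, same selection order (objective: alternative).

-- ===== PORT A =====
def find_disease_and_remedy (user_symptoms : List String) (disease_mapping : List (String × List String)) (remedies_mapping : List (String × List String)) : Option String × Option (List String) :=
  let user_symptoms_set : PySem.Set String :=
    PySem.Set.ofList ((user_symptoms.map PySem.Str.lower).filter (fun s => s != "nil"))
  let st := disease_mapping.foldl
    (fun (st : Option String × Int × Option (List String)) p =>
      let matched := PySem.Set.inter user_symptoms_set (PySem.Set.ofList (p.2.map PySem.Str.lower))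
      let match_score : Int := matched.length
      if 3 ≤ match_score then
        if st.2.1 < match_score then
          (some p.1, match_score, (PySem.Dict.ofList remedies_mapping).get? p.1)
        else st
      else st)
    (none, 0, none)
  match st with
  | (none, _, _) => (none, none)
  | (some d, _, rem) => (some d, rem)

-- ===== PORT B =====
def find_disease_and_remedy_alt (user_symptoms : List String) (disease_mapping : List (String × List String)) (remedies_mapping : List (String × List String)) : Option String × Option (List String) :=
  let wanted : PySem.Set String :=
    PySem.Set.diff (PySem.Set.ofList (user_symptoms.map PySem.Str.lower)) ["nil"]
  let index : PySem.Dict String (List String) :=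
    disease_mapping.foldl
      (fun ix p =>
        (PySem.Set.ofList (p.2.map PySem.Str.lower)).foldl
          (fun ix s => ix.modify s [] (fun ds => ds ++ [p.1])) ix)
      PySem.Dict.empty
  let counts : PySem.Dict String Int :=
    wanted.foldl
      (fun c s => (index.getD s []).foldl (fun c d => c.modify d 0 (fun n => n + 1)) c)
      PySem.Dict.empty
  let sel := disease_mapping.foldl
    (fun (st : Option String × Int) p =>
      let score := counts.getD p.1 0
      if 3 ≤ score ∧ st.2 < score then (some p.1, score) else st)
    (none, 0)
  match sel with
  | (none, _) => (none, none)
  | (some d, _) => (some d, (PySem.Dict.ofList remedies_mapping).get? d)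

-- ===== PRECONDITION & SPEC =====
-- Pre_ excludes association lists with duplicate keys (a Python dict cannot hold them, so the list
-- encoding's behaviour there is accidental) and inputs where some disease sharing at least 3
-- distinct lowercased non-'nil' symptoms with the user is missing from remedies_mapping, on which
-- A can raise KeyError.
def Pre_find_disease_and_remedy (user_symptoms : List String) (disease_mapping : List (String × List String)) (remedies_mapping : List (String × List String)) : Prop :=
  (disease_mapping.map Prod.fst).Nodup ∧ (remedies_mapping.map Prod.fst).Nodup ∧
  ∀ p ∈ disease_mapping,
    3 ≤ (PySem.Set.inter
          (PySem.Set.ofList ((user_symptoms.map PySem.Str.lower).filter (fun s => s != "nil")))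
          (PySem.Set.ofList (p.2.map PySem.Str.lower))).length →
    p.1 ∈ remedies_mapping.map Prod.fst
instance (user_symptoms : List String) (disease_mapping : List (String × List String)) (remedies_mapping : List (String × List String)) : Decidable (Pre_find_disease_and_remedy user_symptoms disease_mapping remedies_mapping) := by unfold Pre_find_disease_and_remedy; infer_instance

def pvWitness_find_disease_and_remedy : List String × (List (String × List String)) × (List (String × List String)) :=
  (["Cough", "fever", "nil", "chills"],
   [("flu", ["cough", "Fever", "chills"]), ("cold", ["cough"])],
   [("flu", ["rest", "tea"]), ("cold", ["soup"])])

def Spec_find_disease_and_remedy (user_symptoms : List String) (disease_mapping : List (String × List String)) (remedies_mapping : List (String × List String)) (out : Option String × Option (List String)) : Prop := out = find_disease_and_remedy_alt user_symptoms disease_mapping remedies_mapping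
instance (user_symptoms : List String) (disease_mapping : List (String × List String)) (remedies_mapping : List (String × List String)) (out : Option String × Option (List String)) : Decidable (Spec_find_disease_and_remedy user_symptoms disease_mapping remedies_mapping out) := by unfold Spec_find_disease_and_remedy; infer_instance

-- ===== CLAIM (what is proved, stated in full; the proofs are below) =====
def Claim_equal_find_disease_and_remedy : Prop := ∀ (user_symptoms : List String) (disease_mapping : List (String × List String)) (remedies_mapping : List (String × List String)), Dom_find_disease_and_remedy user_symptoms disease_mapping remedies_mapping → Pre_find_disease_and_remedy user_symptoms disease_mapping remedies_mapping → Spec_find_disease_and_remedy user_symptoms disease_mapping remedies_mapping (find_disease_and_remedy user_symptoms disease_mapping remedies_mapping)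

-- ===== LEMMAS AND PROOFS =====

-- `l.filter (· == c)` on a duplicate-free list is `[c]` or `[]`.
theorem pv_filter_beq_nodup {α : Type} [BEq α] [LawfulBEq α] (l : List α) (c : α)
    (h : l.Nodup) : l.filter (fun x => x == c) = if c ∈ l then [c] else [] := by
  induction l with
  | nil => simp
  | cons x t ih =>
    rcases List.nodup_cons.mp h with ⟨hx, ht⟩
    by_cases hxc : x = c
    · subst hxc
      have h0 : t.filter (fun y => y == x) = [] := by
        rw [List.filter_eq_nil_iff]
        intro a ha h
        exact hx ((beq_iff_eq.mp h) ▸ ha)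
      rw [List.filter_cons_of_pos (by simp), h0, if_pos (List.mem_cons_self ..)]
    · have hcx : c ≠ x := fun h => hxc h.symm
      rw [List.filter_cons_of_neg (by simpa using hxc), ih ht]
      simp [List.mem_cons, hcx]

-- effect of B's inner index loop (one disease's deduped symptoms) on one bucket
theorem pv_inner_index_getD (S : List String) (hS : S.Nodup) (d : String)
    (ix : PySem.Dict String (List String)) (c : String) :
    (S.foldl (fun ix s => ix.modify s [] (fun ds => ds ++ [d])) ix).getD c []
      = ix.getD c [] ++ (if c ∈ S then [d] else []) := by
  have hmap : S.foldl (fun ix s => ix.modify s [] (fun ds => ds ++ [d])) ix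
      = (S.map (fun s => (s, d))).foldl (fun ix q => ix.modify q.1 [] (fun ds => ds ++ [q.2])) ix := by
    rw [List.foldl_map]
  rw [hmap, PySem.Dict.getD_foldl_modify_append]
  congr 1
  rw [List.filter_map, List.map_map]
  have : ((fun q => q.1 == c) ∘ fun s => (s, (d : String))) = fun s => s == c := rfl
  rw [this, pv_filter_beq_nodup S c hS]
  by_cases hc : c ∈ S <;> simp [hc]

-- characterisation of B's inverted index: bucket s lists, in order, the diseases
-- whose deduped lowercased symptom list contains s
theorem pv_index_getD (dm : List (String × List String))
    (ix : PySem.Dict String (List String)) (s : String) :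
    (dm.foldl
      (fun ix p =>
        (PySem.Set.ofList (p.2.map PySem.Str.lower)).foldl
          (fun ix s => ix.modify s [] (fun ds => ds ++ [p.1])) ix) ix).getD s []
      = ix.getD s []
        ++ (dm.filter (fun p => s ∈ PySem.Set.ofList (p.2.map PySem.Str.lower))).map Prod.fst := by
  induction dm generalizing ix with
  | nil => simp
  | cons p t ih =>
    simp only [List.foldl_cons, ih, List.filter_cons]
    rw [pv_inner_index_getD _ (PySem.Set.nodup_ofList _) p.1 ix s]
    by_cases hs : s ∈ PySem.Set.ofList (p.2.map PySem.Str.lower) <;>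
      simp [hs, List.append_assoc]

-- counting a key in first components of a filtered duplicate-free association list
theorem pv_count_fst_filter {β : Type} (dm : List (String × β)) (p : String × β)
    (hp : p ∈ dm) (hnd : (dm.map Prod.fst).Nodup) (φ : String × β → Bool) :
    ((dm.filter φ).map Prod.fst).count p.1 = if φ p then 1 else 0 := by
  revert hp hnd
  induction dm with
  | nil => intro hp _; cases hp
  | cons q t ih =>
    intro hp hnd
    rw [List.map_cons] at hnd
    rcases List.nodup_cons.mp hnd with ⟨hq, ht⟩
    rcases List.mem_cons.mp hp with rfl | hp'
    · have hzero : ((t.filter φ).map Prod.fst).count p.1 = 0 := by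
        rw [List.count_eq_zero]
        intro hmem
        rcases List.mem_map.mp hmem with ⟨r, hr, hr1⟩
        exact hq (hr1 ▸ List.mem_map_of_mem (List.mem_of_mem_filter hr))
      by_cases hφ : φ p <;>
        simp [hφ, hzero]
    · have hne : q.1 ≠ p.1 := fun h => hq (h ▸ List.mem_map_of_mem hp')
      by_cases hφ : φ q <;>
        simp [hφ, hne, ih hp' ht]

-- B's counting loop: the final count of d is the sum over wanted of d's occurrences in bucket s
theorem pv_counts_getD (ix : PySem.Dict String (List String)) (l : List String)
    (c : PySem.Dict String Int) (d : String) :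
    (l.foldl (fun c s => (ix.getD s []).foldl (fun c d => c.modify d 0 (fun n => n + 1)) c) c).getD d 0
      = c.getD d 0 + ((l.map (fun s => ((ix.getD s []).count d : Int))).sum) := by
  induction l generalizing c with
  | nil => simp
  | cons s t ih =>
    simp only [List.foldl_cons, List.map_cons, List.sum_cons, ih,
      PySem.Dict.getD_foldl_modify_add_one]
    ring

-- the selection loops run in step, with A's remedies slot determined by its best slot
theorem pv_sel_rel (rm : List (String × List String))
    (counts : PySem.Dict String Int) (f : (String × List String) → Int)
    (l : List (String × List String))
    (hf : ∀ p ∈ l, f p = counts.getD p.1 0)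
    (b : Option String) (sc : Int) (r : Option (List String))
    (hr : r = b.bind (fun d => (PySem.Dict.ofList rm).get? d)) :
    l.foldl (fun st p =>
        if 3 ≤ f p then
          if st.2.1 < f p then (some p.1, f p, (PySem.Dict.ofList rm).get? p.1) else st
        else st) (b, sc, r)
      = ((l.foldl (fun (st : Option String × Int) p =>
            if 3 ≤ counts.getD p.1 0 ∧ st.2 < counts.getD p.1 0 then (some p.1, counts.getD p.1 0) else st) (b, sc)).1,
         (l.foldl (fun (st : Option String × Int) p =>
            if 3 ≤ counts.getD p.1 0 ∧ st.2 < counts.getD p.1 0 then (some p.1, counts.getD p.1 0) else st) (b, sc)).2,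
         (l.foldl (fun (st : Option String × Int) p =>
            if 3 ≤ counts.getD p.1 0 ∧ st.2 < counts.getD p.1 0 then (some p.1, counts.getD p.1 0) else st) (b, sc)).1.bind
           (fun d => (PySem.Dict.ofList rm).get? d)) := by
  match l with
  | [] => simp [hr]
  | p :: t =>
    have hfp : f p = counts.getD p.1 0 := hf p (List.mem_cons_self ..)
    have hft : ∀ q ∈ t, f q = counts.getD q.1 0 := fun q hq => hf q (List.mem_cons_of_mem _ hq)
    simp only [List.foldl_cons, hfp]
    by_cases h3 : 3 ≤ counts.getD p.1 0
    · by_cases hlt : sc < counts.getD p.1 0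
      · simp only [if_pos h3, if_pos hlt, if_pos (⟨h3, hlt⟩ : 3 ≤ counts.getD p.1 0 ∧ sc < counts.getD p.1 0)]
        exact pv_sel_rel rm counts f t hft (some p.1) (counts.getD p.1 0) _ rfl
      · simp only [if_pos h3, if_neg hlt, if_neg (fun h => hlt h.2 : ¬(3 ≤ counts.getD p.1 0 ∧ sc < counts.getD p.1 0))]
        exact pv_sel_rel rm counts f t hft b sc r hr
    · simp only [if_neg h3, if_neg (fun h => h3 h.1 : ¬(3 ≤ counts.getD p.1 0 ∧ sc < counts.getD p.1 0))]
      exact pv_sel_rel rm counts f t hft b sc r hr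

-- A's score of a disease equals B's final counter value for it
theorem pv_score_eq (user_symptoms : List String) (dm : List (String × List String))
    (hnd : (dm.map Prod.fst).Nodup) (p : String × List String) (hp : p ∈ dm) :
    ((PySem.Set.inter
        (PySem.Set.ofList ((user_symptoms.map PySem.Str.lower).filter (fun s => s != "nil")))
        (PySem.Set.ofList (p.2.map PySem.Str.lower))).length : Int)
    = ((PySem.Set.diff (PySem.Set.ofList (user_symptoms.map PySem.Str.lower)) ["nil"]).foldl
        (fun c s => ((dm.foldl
            (fun ix p =>
              (PySem.Set.ofList (p.2.map PySem.Str.lower)).foldl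
                (fun ix s => ix.modify s [] (fun ds => ds ++ [p.1])) ix)
            PySem.Dict.empty).getD s []).foldl (fun c d => c.modify d 0 (fun n => n + 1)) c)
        PySem.Dict.empty).getD p.1 0 := by
  set low := user_symptoms.map PySem.Str.lower with hlow
  -- B side: counts.getD p.1 0 = countP over wanted of "p lists s"
  rw [pv_counts_getD]
  have hbucket : ∀ s, ((dm.foldl
      (fun ix p =>
        (PySem.Set.ofList (p.2.map PySem.Str.lower)).foldl
          (fun ix s => ix.modify s [] (fun ds => ds ++ [p.1])) ix)
      PySem.Dict.empty).getD s []).count p.1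
      = if (s ∈ PySem.Set.ofList (p.2.map PySem.Str.lower) : Bool) then 1 else 0 := by
    intro s
    rw [pv_index_getD, PySem.Dict.getD_empty, List.nil_append]
    exact pv_count_fst_filter dm p hp hnd _
  simp only [hbucket]
  simp only [Nat.cast_ite, Nat.cast_one, Nat.cast_zero]
  rw [PySem.List.sum_map_ite_one_zero]
  -- A side: intersection length = countP over uset of the same predicate
  have hA : (PySem.Set.inter (PySem.Set.ofList (low.filter (fun s => s != "nil")))
      (PySem.Set.ofList (p.2.map PySem.Str.lower))).length
      = (PySem.Set.ofList (low.filter (fun s => s != "nil"))).countP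
          (fun s => s ∈ PySem.Set.ofList (p.2.map PySem.Str.lower)) := by
    simp [PySem.Set.inter, List.countP_eq_length_filter, PySem.Set.contains]
  rw [hA]
  -- the two duplicate-free symptom lists are permutations, so countP agrees
  have hperm : (PySem.Set.ofList (low.filter (fun s => s != "nil"))).Perm
      (PySem.Set.diff (PySem.Set.ofList low) ["nil"]) := by
    rw [List.perm_ext_iff_of_nodup (PySem.Set.nodup_ofList _)
      (PySem.Set.nodup_diff _ _ (PySem.Set.nodup_ofList _))]
    intro a
    simp [PySem.Set.mem_ofList, PySem.Set.mem_diff, List.mem_filter]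
  rw [hperm.countP_eq]
  simp [PySem.Dict.getD_empty]

-- ===== VERDICT (by name: the statement is the Claim_ definition above) =====
theorem find_disease_and_remedy_spec : Claim_equal_find_disease_and_remedy := by
  intro us dm rm _ hpre
  unfold Spec_find_disease_and_remedy
  simp only [find_disease_and_remedy, find_disease_and_remedy_alt]
  rw [pv_sel_rel rm _ _ dm (fun p hp => pv_score_eq us dm hpre.1 p hp) none 0 none rfl]
  split <;> split <;> simp_all <;>
    (rename_i h _; exact (h.1 ▸ h.2.2).symm)
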